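-- pv_equiv track=rewrite | github.com/NicoaClemens/nonogram | src/solver.py | consensus_array
-- ===== SOURCE A (Python) =====
-- def consensus_array(arrays):
--     result = []
--     for values in zip(*arrays):
--         if -1 in values:
--             result.append(-1)
--         elif len(set(values)) > 1:
--             result.append(-1)
--         elif values[0] == 0:
--             result.append(0)
--         elif values[0] == 1:
--             result.append(1)
--         else:
--             raise ValueError("Unexpected value in consensus array calculation.")
--     return result
-- ===== SOURCE B (Python) =====
-- def consensus_array(arrays):
--     result = None
--     for array in arrays:
--         if result is None:
--             result = list(array)
--         else:
--             n = min(len(result), len(array))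
--             result = [_combine(result[i], array[i]) for i in range(n)]
--     if result is None:
--         return []
--     for v in result:
--         if v not in (-1, 0, 1):
--             raise ValueError("Unexpected value in consensus array calculation.")
--     return result
--
--
-- def _combine(a, b):
--     return -1 if a == -1 or b == -1 or a != b else a
-- ===== Notes on version B (the rewrite author's own statement) =====
-- stated objective: alternative
-- what changed: Replaces the transpose-and-column-scan (zip(*arrays) plus a set-cardinality test per column) with a left fold over the arrays that element-wise combines a running consensus (-1 absorbing, disagreement -> -1), with one final validation pass.
import Mathlib
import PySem

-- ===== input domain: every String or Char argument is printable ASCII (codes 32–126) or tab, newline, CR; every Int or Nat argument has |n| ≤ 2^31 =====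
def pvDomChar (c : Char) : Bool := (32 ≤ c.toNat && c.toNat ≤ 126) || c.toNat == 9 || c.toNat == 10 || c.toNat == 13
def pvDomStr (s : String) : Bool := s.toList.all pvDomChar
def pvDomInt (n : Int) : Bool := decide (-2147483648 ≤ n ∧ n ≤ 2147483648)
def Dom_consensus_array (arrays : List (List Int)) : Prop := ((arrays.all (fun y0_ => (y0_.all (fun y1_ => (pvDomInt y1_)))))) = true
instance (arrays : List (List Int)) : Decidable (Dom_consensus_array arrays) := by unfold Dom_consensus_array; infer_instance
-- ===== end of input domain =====

-- B replaces A's transpose-and-column-scan by a fold over the arrays combining a running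
-- consensus element-wise (alternative decomposition, same cost).

-- ===== PORT A =====
-- zip(*arrays) ported index-wise: the zip has pvMinLen arrays columns, column i is
-- arrays.map (fun a => a.getD i 0) (getD is exact: i < every array's length there).
def pvMinLen : List (List Int) → Nat
  | [] => 0
  | a :: rest => rest.foldl (fun m x => min m x.length) a.length

def consensus_array (arrays : List (List Int)) : List Int :=
  (List.range (pvMinLen arrays)).foldl (fun result i =>
    let values := arrays.map (fun a => a.getD i 0)
    if (-1 : Int) ∈ values then result ++ [-1]
    else if 1 < (PySem.Set.ofList values).length then result ++ [-1]
    else if values.getD 0 0 = 0 then result ++ [0]      -- values[0]: values ≠ [] here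
    else if values.getD 0 0 = 1 then result ++ [1]
    else result)                                        -- raise ValueError: excluded by Pre_
    []

-- ===== PORT B =====
def pvCombine (a b : Int) : Int := if a = -1 ∨ b = -1 ∨ a ≠ b then -1 else a

-- the list comprehension [_combine(result[i], array[i]) for i in range(n)]
def pvMerge (res arr : List Int) : List Int :=
  (List.range (min res.length arr.length)).map (fun i => pvCombine (res.getD i 0) (arr.getD i 0))

def consensus_array_alt (arrays : List (List Int)) : List Int :=
  match arrays.foldl (fun r array =>
      match r with
      | none => some array
      | some res => some (pvMerge res array)) (none : Option (List Int)) with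
  | none => []
  | some res => res   -- the final validation loop raises only outside Pre_, else returns res

-- ===== PRECONDITION & SPEC =====
-- Pre_ excludes exactly the inputs where A raises ValueError (and B raises too): some column
-- of the zip is constant with a value outside {-1, 0, 1}.
def pvCol (arrays : List (List Int)) (i : Nat) : List Int := arrays.map (fun a => a.getD i 0)

def Pre_consensus_array (arrays : List (List Int)) : Prop :=
  ∀ i ∈ List.range (pvMinLen arrays),
    ¬ ((-1 : Int) ∉ pvCol arrays i ∧
       ((pvCol arrays i).all (fun x => x = (pvCol arrays i).getD 0 0)) = true ∧
       (pvCol arrays i).getD 0 0 ≠ 0 ∧ (pvCol arrays i).getD 0 0 ≠ 1)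
instance (arrays : List (List Int)) : Decidable (Pre_consensus_array arrays) := by
  unfold Pre_consensus_array; infer_instance

def pvWitness_consensus_array : List (List Int) := [[0, 1, -1], [0, 0, 5]]

def Spec_consensus_array (arrays : List (List Int)) (out : List Int) : Prop := out = consensus_array_alt arrays
instance (arrays : List (List Int)) (out : List Int) : Decidable (Spec_consensus_array arrays out) := by unfold Spec_consensus_array; infer_instance

-- ===== CLAIM (what is proved, stated in full; the proofs are below) =====
def Claim_equal_consensus_array : Prop := ∀ (arrays : List (List Int)), Dom_consensus_array arrays → Pre_consensus_array arrays → Spec_consensus_array arrays (consensus_array arrays)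

-- ===== LEMMAS AND PROOFS =====

-- the column function of the zip, as produced by one step of A's fold
def pvGA (arrays : List (List Int)) (i : Nat) : List Int :=
  let values := pvCol arrays i
  if (-1 : Int) ∈ values then [-1]
  else if 1 < (PySem.Set.ofList values).length then [-1]
  else if values.getD 0 0 = 0 then [0]
  else if values.getD 0 0 = 1 then [1]
  else []

theorem foldl_min_le (t : List (List Int)) (m : Nat) :
    t.foldl (fun m x => min m x.length) m ≤ m := by
  induction t generalizing m with
  | nil => simp
  | cons x t ih => exact le_trans (ih (min m x.length)) (Nat.min_le_left _ _)

theorem foldl_pvCombine_char (t : List Int) (h : Int) :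
    t.foldl pvCombine h = if h ≠ -1 ∧ (t.all (fun x => x = h)) = true then h else -1 := by
  induction t generalizing h with
  | nil =>
    by_cases hh : h = -1 <;> simp [hh]
  | cons x t ih =>
    rw [List.foldl_cons, ih]
    by_cases hh : h = -1
    · simp [pvCombine, hh]
    · by_cases hx : x = h
      · subst hx; simp [pvCombine, hh]
      · simp [pvCombine, hh, hx, Ne.symm hx]

theorem range_map_getD (l : List Int) :
    (List.range l.length).map (fun i => l.getD i 0) = l := by
  apply List.ext_getElem
  · simp
  · intro i h1 h2
    simp only [List.getElem_map, List.getElem_range, List.getD_eq_getElem?_getD,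
      List.getElem?_eq_getElem h2, Option.getD_some]

theorem foldl_pvMerge_char (rest : List (List Int)) (a : List Int) :
    rest.foldl pvMerge a =
      (List.range (pvMinLen (a :: rest))).map
        (fun i => (rest.map (fun x => x.getD i 0)).foldl pvCombine (a.getD i 0)) := by
  induction rest generalizing a with
  | nil =>
    simp only [List.foldl_nil, pvMinLen, List.map_nil]
    exact (range_map_getD a).symm
  | cons b t ih =>
    rw [List.foldl_cons, ih]
    have hlen : (pvMerge a b).length = min a.length b.length := by simp [pvMerge]
    have hmin : pvMinLen (pvMerge a b :: t) = pvMinLen (a :: b :: t) := by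
      simp [pvMinLen, hlen]
    rw [hmin]
    apply List.map_congr_left
    intro i hi
    rw [List.mem_range] at hi
    have hib : i < min a.length b.length := by
      have : pvMinLen (a :: b :: t) ≤ min a.length b.length := by
        simpa [pvMinLen] using foldl_min_le t (min a.length b.length)
      omega
    have hgd : (pvMerge a b).getD i 0 = pvCombine (a.getD i 0) (b.getD i 0) := by
      have h1 : i < ((List.range (min a.length b.length)).map
          (fun i => pvCombine (a.getD i 0) (b.getD i 0))).length := by simpa using hib
      rw [pvMerge, List.getD_eq_getElem _ _ h1]
      simp
    rw [hgd, List.map_cons, List.foldl_cons]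

theorem foldl_opt_some (l : List (List Int)) (r : List Int) :
    l.foldl (fun r array =>
      match r with
      | none => some array
      | some res => some (pvMerge res array)) (some r) = some (l.foldl pvMerge r) := by
  induction l generalizing r with
  | nil => rfl
  | cons b t ih => simpa using ih (pvMerge r b)

theorem alt_char (a : List Int) (rest : List (List Int)) :
    consensus_array_alt (a :: rest) =
      (List.range (pvMinLen (a :: rest))).map
        (fun i => (rest.map (fun x => x.getD i 0)).foldl pvCombine (a.getD i 0)) := by
  unfold consensus_array_alt
  rw [List.foldl_cons]
  show (match rest.foldl _ (some a) with | none => [] | some res => res) = _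
  rw [foldl_opt_some]
  exact foldl_pvMerge_char rest a

theorem foldl_step_eq (f : List Int → Nat → List Int) (g : Nat → List Int)
    (hf : ∀ r i, f r i = r ++ g i) :
    ∀ (l : List Nat) (acc : List Int), l.foldl f acc = acc ++ l.flatMap g := by
  intro l
  induction l with
  | nil => simp
  | cons x t ih => intro acc; rw [List.foldl_cons, hf, ih, List.flatMap_cons, List.append_assoc]

theorem A_char (arrays : List (List Int)) :
    consensus_array arrays = (List.range (pvMinLen arrays)).flatMap (pvGA arrays) := by
  unfold consensus_array
  rw [foldl_step_eq _ (pvGA arrays) ?_ (List.range (pvMinLen arrays)) []]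
  · simp
  · intro r i
    simp only [pvGA, pvCol]
    split_ifs <;> simp

theorem flatMap_eq_map (l : List Nat) (g : Nat → List Int) (f : Nat → Int)
    (h : ∀ x ∈ l, g x = [f x]) : l.flatMap g = l.map f := by
  induction l with
  | nil => rfl
  | cons x t ih =>
    rw [List.flatMap_cons, List.map_cons, h x List.mem_cons_self,
      ih fun y hy => h y (List.mem_cons_of_mem _ hy)]
    rfl

theorem small_set_const (c : List Int) (hle : ¬ 1 < (PySem.Set.ofList c).length) :
    ∀ x ∈ c, ∀ y ∈ c, x = y := by
  intro x hx y hy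
  rw [← PySem.Set.mem_ofList] at hx hy
  match hS : PySem.Set.ofList c with
  | [] => rw [hS] at hx; simp at hx
  | [z] => rw [hS] at hx hy; simp at hx hy; omega
  | z :: w :: r => rw [hS] at hle; simp at hle

theorem big_set_two (c : List Int) (hgt : 1 < (PySem.Set.ofList c).length) :
    ∃ x ∈ c, ∃ y ∈ c, x ≠ y := by
  match hS : PySem.Set.ofList c with
  | [] => rw [hS] at hgt; simp at hgt
  | [z] => rw [hS] at hgt; simp at hgt
  | z :: w :: r =>
    have hnd := PySem.Set.nodup_ofList (xs := c)
    rw [hS] at hnd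
    have hzw : z ≠ w := by
      rcases List.nodup_cons.mp hnd with ⟨hz, _⟩
      intro h; exact hz (h ▸ List.mem_cons_self)
    refine ⟨z, ?_, w, ?_, hzw⟩
    · rw [← PySem.Set.mem_ofList, hS]; simp
    · rw [← PySem.Set.mem_ofList, hS]; simp

theorem pointwise (a : List Int) (rest : List (List Int)) (i : Nat)
    (hpre : ¬ ((-1 : Int) ∉ pvCol (a :: rest) i ∧
       ((pvCol (a :: rest) i).all (fun x => x = (pvCol (a :: rest) i).getD 0 0)) = true ∧
       (pvCol (a :: rest) i).getD 0 0 ≠ 0 ∧ (pvCol (a :: rest) i).getD 0 0 ≠ 1)) :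
    pvGA (a :: rest) i =
      [(rest.map (fun x => x.getD i 0)).foldl pvCombine (a.getD i 0)] := by
  have hc : pvCol (a :: rest) i = a.getD i 0 :: rest.map (fun x => x.getD i 0) := rfl
  have hhd : (pvCol (a :: rest) i).getD 0 0 = a.getD i 0 := by rw [hc]; rfl
  unfold pvGA
  simp only []
  split_ifs with h1 h2 h3 h4
  · -- -1 ∈ column: the fold is -1
    have hfold : (rest.map (fun x => x.getD i 0)).foldl pvCombine (a.getD i 0) = -1 := by
      rw [foldl_pvCombine_char]
      split_ifs with hcond
      · exfalso
        obtain ⟨hne, hall⟩ := hcond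
        rw [hc] at h1
        rcases List.mem_cons.mp h1 with h | h
        · exact hne h.symm
        · have := List.all_eq_true.mp hall (-1) h
          simp at this
          exact hne this.symm
      · rfl
    rw [hfold]
  · -- more than one distinct value: the fold is -1
    have hfold : (rest.map (fun x => x.getD i 0)).foldl pvCombine (a.getD i 0) = -1 := by
      rw [foldl_pvCombine_char]
      split_ifs with hcond
      · exfalso
        obtain ⟨hne, hall⟩ := hcond
        obtain ⟨x, hx, y, hy, hxy⟩ := big_set_two _ h2
        rw [hc] at hx hy
        have ex : x = a.getD i 0 := by
          rcases List.mem_cons.mp hx with h | h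
          · exact h
          · have := List.all_eq_true.mp hall x h
            simpa using this
        have ey : y = a.getD i 0 := by
          rcases List.mem_cons.mp hy with h | h
          · exact h
          · have := List.all_eq_true.mp hall y h
            simpa using this
        exact hxy (ex.trans ey.symm)
      · rfl
    rw [hfold]
  · -- constant column of 0
    rw [hhd] at h3
    have hfold : (rest.map (fun x => x.getD i 0)).foldl pvCombine (a.getD i 0) = a.getD i 0 := by
      rw [foldl_pvCombine_char]
      split_ifs with hcond
      · rfl
      · exfalso
        apply hcond
        refine ⟨by rw [h3]; decide, List.all_eq_true.mpr ?_⟩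
        intro x hx
        have := small_set_const _ h2 x (by rw [hc]; exact List.mem_cons_of_mem _ hx)
          (a.getD i 0) (by rw [hc]; exact List.mem_cons_self)
        simp [this]
    rw [hfold, h3]
  · -- constant column of 1
    rw [hhd] at h4
    have hfold : (rest.map (fun x => x.getD i 0)).foldl pvCombine (a.getD i 0) = a.getD i 0 := by
      rw [foldl_pvCombine_char]
      split_ifs with hcond
      · rfl
      · exfalso
        apply hcond
        refine ⟨by rw [h4]; decide, List.all_eq_true.mpr ?_⟩
        intro x hx
        have := small_set_const _ h2 x (by rw [hc]; exact List.mem_cons_of_mem _ hx)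
          (a.getD i 0) (by rw [hc]; exact List.mem_cons_self)
        simp [this]
    rw [hfold, h4]
  · -- ValueError column: excluded by Pre_
    exfalso
    apply hpre
    refine ⟨h1, List.all_eq_true.mpr ?_, h3, h4⟩
    intro x hx
    have := small_set_const _ h2 x hx ((pvCol (a :: rest) i).getD 0 0)
      (by rw [hhd, hc]; exact List.mem_cons_self)
    simp [this]

-- ===== VERDICT (by name: the statement is the Claim_ definition above) =====
theorem consensus_array_spec : Claim_equal_consensus_array := by
  intro arrays _ pre
  unfold Spec_consensus_array
  match arrays with
  | [] => rfl
  | a :: rest =>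
    rw [alt_char, A_char]
    apply flatMap_eq_map
    intro i hi
    exact pointwise a rest i (pre i hi)
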